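-- pv_equiv track=rewrite | github.com/shmouel1824/parlons-francais | extract_commonvoice.py | detect_class
-- ===== SOURCE A (Python) =====
-- PHONEME_RULES = [
--     ('nasal',     ['on', 'om', 'an', 'am', 'en', 'em',
--                    'in', 'im', 'ain', 'aim', 'ein', 'un', 'um']),
--     ('fricative', ['ch', 'rr', ' r', 'r ', 'er', 'ir', 'or', 'ar', 'ur']),
--     ('eu_sound',  ['eu', 'œu', 'œ', 'eur', 'eux']),
--     ('oi_ui',     ['oi', 'ui', 'oui', 'nuit', 'puis', 'fruit']),
--     ('liquid_l',  ['ll', 'il ', 'ill', ' l', 'l ', 'al', 'el', 'ol', 'ul']),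
-- ]
--
-- def detect_class(sentence):
--     text = sentence.lower()
--     scores = {}
--     for cls, patterns in PHONEME_RULES:
--         score = sum(text.count(p) for p in patterns)
--         if score > 0:
--             scores[cls] = score
--     return max(scores, key=scores.get) if scores else 'standard'
-- ===== SOURCE B (Python) =====
-- PHONEME_RULES = [
--     ('nasal',     ['on', 'om', 'an', 'am', 'en', 'em',
--                    'in', 'im', 'ain', 'aim', 'ein', 'un', 'um']),
--     ('fricative', ['ch', 'rr', ' r', 'r ', 'er', 'ir', 'or', 'ar', 'ur']),
--     ('eu_sound',  ['eu', 'œu', 'œ', 'eur', 'eux']),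
--     ('oi_ui',     ['oi', 'ui', 'oui', 'nuit', 'puis', 'fruit']),
--     ('liquid_l',  ['ll', 'il ', 'ill', ' l', 'l ', 'al', 'el', 'ol', 'ul']),
-- ]
--
--
-- def _best(text, rules):
--     """Recursively combine rules back-to-front into the winning (class, score)
--     pair; a head rule beats the best of the tail only with a positive score at
--     least as large, so the earliest maximal class wins and the base case is the default."""
--     if not rules:
--         return ('standard', 0)
--     cls, patterns = rules[0]
--     score = sum(text.count(p) for p in patterns)
--     best = _best(text, rules[1:])
--     if score > 0 and score >= best[1]:
--         return (cls, score)
--     return best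
--
--
-- def detect_class(sentence):
--     return _best(sentence.lower(), PHONEME_RULES)[0]
-- ===== Notes on version B (the rewrite author's own statement) =====
-- stated objective: alternative
-- what changed: B replaces A's two-phase build-a-dict-of-positive-scores-then-argmax-with-max/key by a structural recursion over the rule list that builds the answer back-to-front: the recursive call yields the best (class, score) of the tail and the head rule overrides it exactly when its score is positive and at least as large, which realises first-max tie-breaking, with the default class as the recursion base case.
import Mathlib
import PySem

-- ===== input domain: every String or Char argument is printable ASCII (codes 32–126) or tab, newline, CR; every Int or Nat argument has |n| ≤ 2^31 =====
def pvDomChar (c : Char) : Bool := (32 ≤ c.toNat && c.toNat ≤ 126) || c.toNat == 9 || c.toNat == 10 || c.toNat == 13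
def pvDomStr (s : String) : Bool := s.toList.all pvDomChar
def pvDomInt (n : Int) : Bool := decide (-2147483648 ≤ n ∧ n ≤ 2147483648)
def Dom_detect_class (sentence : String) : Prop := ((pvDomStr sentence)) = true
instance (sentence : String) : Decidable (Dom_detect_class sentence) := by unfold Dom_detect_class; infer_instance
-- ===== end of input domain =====

-- B replaces A's build-a-dict-then-argmax two-phase structure by a structural recursion
-- over the rules that combines the answer back-to-front (objective: alternative; same cost).

def PHONEME_RULES : List (String × List String) := [
  ("nasal",     ["on", "om", "an", "am", "en", "em",
                 "in", "im", "ain", "aim", "ein", "un", "um"]),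
  ("fricative", ["ch", "rr", " r", "r ", "er", "ir", "or", "ar", "ur"]),
  ("eu_sound",  ["eu", "œu", "œ", "eur", "eux"]),
  ("oi_ui",     ["oi", "ui", "oui", "nuit", "puis", "fruit"]),
  ("liquid_l",  ["ll", "il ", "ill", " l", "l ", "al", "el", "ol", "ul"])]

-- ===== PORT A =====
def detect_class (sentence : String) : String :=
  let text := PySem.Str.lower sentence
  let scores : PySem.Dict String Int :=
    PHONEME_RULES.foldl
      (fun (d : PySem.Dict String Int) (r : String × List String) =>
        let score : Int := (r.2.map (fun p => (PySem.Str.count text p : Int))).sum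
        if score > 0 then d.insert r.1 score else d)
      PySem.Dict.empty
  -- 'max(scores, key=scores.get) if scores else "standard"': keys in insertion order,
  -- first maximum wins; scores.get k = getD k 0 since every key looked up is present.
  if scores.items = [] then "standard"
  else (PySem.List.max? scores.keys (fun k => scores.getD k 0)).getD "standard"

-- ===== PORT B =====
-- Source B's recursive helper _best: best (class, score) of a rule list, combined head-first.
def pvBestB (text : String) : List (String × List String) → String × Int
  | [] => ("standard", 0)
  | r :: rest =>
    let score : Int := (r.2.map (fun p => (PySem.Str.count text p : Int))).sum
    let best := pvBestB text rest
    if score > 0 ∧ score ≥ best.2 then (r.1, score) else best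

def detect_class_alt (sentence : String) : String :=
  (pvBestB (PySem.Str.lower sentence) PHONEME_RULES).1

-- ===== PRECONDITION & SPEC =====
def Spec_detect_class (sentence : String) (out : String) : Prop := out = detect_class_alt sentence
instance (sentence : String) (out : String) : Decidable (Spec_detect_class sentence out) := by unfold Spec_detect_class; infer_instance

-- ===== CLAIM (what is proved, stated in full; the proofs are below) =====
def Claim_equal_detect_class : Prop := ∀ (sentence : String), Dom_detect_class sentence → Spec_detect_class sentence (detect_class sentence)

-- ===== LEMMAS AND PROOFS =====

-- score of one rule (proof-side name for the sum both ports compute inline)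
def pvScore (text : String) (r : String × List String) : Int :=
  (r.2.map (fun p => (PySem.Str.count text p : Int))).sum

-- A's dict loop appends exactly the positive-score entries, in order.
lemma pv_fold_items (ps : List (String × Int)) (d : PySem.Dict String Int)
    (hfresh : ∀ p ∈ ps, d.contains p.1 = false)
    (hps : (ps.map Prod.fst).Nodup) :
    (ps.foldl (fun d p => if p.2 > 0 then d.insert p.1 p.2 else d) d).items
      = d.items ++ ps.filter (fun p => p.2 > 0) := by
  induction ps generalizing d with
  | nil => simp
  | cons p rest ih =>
    simp only [List.map_cons, List.nodup_cons, List.mem_map] at hps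
    simp only [List.foldl_cons, List.filter_cons]
    by_cases hp : p.2 > 0
    · rw [if_pos hp]
      have hfd : d.contains p.1 = false := hfresh p (List.mem_cons_self ..)
      have hfresh' : ∀ q ∈ rest, (d.insert p.1 p.2).contains q.1 = false := by
        intro q hq
        rw [PySem.Dict.contains_insert]
        have hne : q.1 ≠ p.1 := fun h => hps.1 ⟨q, hq, h⟩
        simp [hne, hfresh q (List.mem_cons_of_mem _ hq)]
      rw [ih _ hfresh' hps.2, PySem.Dict.items_insert_of_not_contains (h := hfd)]
      simp [hp]
    · rw [if_neg hp, ih _ (fun q hq => hfresh q (List.mem_cons_of_mem _ hq)) hps.2]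
      simp [hp]

-- B-side combinator on (class, score) pairs: Source B's _best with the scores pre-computed.
def pvFrBest : List (String × Int) → String × Int
  | [] => ("standard", 0)
  | p :: t =>
    let b := pvFrBest t
    if p.2 > 0 ∧ p.2 ≥ b.2 then p else b

lemma pvFrBest_nonneg (ps : List (String × Int)) : 0 ≤ (pvFrBest ps).2 := by
  induction ps with
  | nil => simp [pvFrBest]
  | cons p t ih =>
    simp only [pvFrBest]
    split_ifs with h
    · exact le_of_lt h.1
    · exact ih

lemma pvFrBest_zero (ps : List (String × Int)) (h : (pvFrBest ps).2 ≤ 0) :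
    pvFrBest ps = ("standard", 0) := by
  induction ps with
  | nil => rfl
  | cons p t ih =>
    simp only [pvFrBest] at h ⊢
    split_ifs at h ⊢ with hc
    · exact absurd h (not_le.mpr hc.1)
    · exact ih h

-- A's running-max left fold from a nonnegative start equals the right-fold best,
-- unless the latter does not beat the start.
lemma pv_foldl_eq_frBest (ps : List (String × Int)) (b : String × Int) (hb : 0 ≤ b.2) :
    ps.foldl (fun bs p => if p.2 > bs.2 then (p.1, p.2) else bs) b
      = if (pvFrBest ps).2 > b.2 then pvFrBest ps else b := by
  induction ps generalizing b with
  | nil =>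
    simp only [List.foldl_nil, pvFrBest]
    rw [if_neg (not_lt.mpr hb)]
  | cons p t ih =>
    simp only [List.foldl_cons, pvFrBest]
    have htn := pvFrBest_nonneg t
    by_cases hp : p.2 > b.2
    · rw [if_pos hp, ih (p.1, p.2) (le_of_lt (lt_of_le_of_lt hb hp))]
      by_cases hh : p.2 ≥ (pvFrBest t).2
      · rw [if_pos (⟨lt_of_le_of_lt hb hp, hh⟩ : p.2 > 0 ∧ p.2 ≥ (pvFrBest t).2)]
        have h1 : ¬ (pvFrBest t).2 > (p.1, p.2).2 := not_lt.mpr hh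
        rw [if_neg h1]
        have h2 : p.2 > b.2 := hp
        rw [if_pos h2]
      · rw [not_le] at hh
        have h1 : (pvFrBest t).2 > (p.1, p.2).2 := hh
        rw [if_pos h1,
          if_neg (fun hc : p.2 > 0 ∧ p.2 ≥ (pvFrBest t).2 => absurd hc.2 (not_le.mpr hh)),
          if_pos (lt_trans hp hh)]
    · rw [if_neg hp, ih b hb]
      by_cases hh : p.2 > 0 ∧ p.2 ≥ (pvFrBest t).2
      · rw [if_pos hh]
        have h1 : ¬ (pvFrBest t).2 > b.2 := not_lt.mpr (le_trans hh.2 (not_lt.mp hp))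
        rw [if_neg h1, if_neg hp]
      · rw [if_neg hh]

-- B's fold ignores non-positive entries while the running score is ≥ 0.
lemma pv_fold_filter (ps : List (String × Int)) (b : String) (s : Int) (hs : 0 ≤ s) :
    ps.foldl (fun bs p => if p.2 > bs.2 then (p.1, p.2) else bs) (b, s)
      = (ps.filter (fun p => p.2 > 0)).foldl
          (fun bs p => if p.2 > bs.2 then (p.1, p.2) else bs) (b, s) := by
  induction ps generalizing b s with
  | nil => rfl
  | cons p rest ih =>
    simp only [List.foldl_cons, List.filter_cons]
    by_cases hp : p.2 > 0
    · simp only [hp, decide_true, if_true, List.foldl_cons]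
      by_cases h2 : p.2 > s
      · rw [if_pos h2]
        exact ih p.1 p.2 (le_of_lt hp)
      · rw [if_neg h2]
        exact ih b s hs
    · have h2 : ¬ p.2 > s := fun h => hp (lt_of_le_of_lt hs h)
      simp only [hp, decide_false, if_neg h2]
      simpa using ih b s hs

-- A's first-max scan over keys equals the running argmax, given a key function that
-- reads off each pair's score.
lemma pv_fold_argmax (key : String → Int) (rest : List (String × Int)) (b : String) (s : Int)
    (hb : key b = s) (hrest : ∀ p ∈ rest, key p.1 = p.2) :
    (rest.foldl (fun acc p =>
        match acc with
        | none => some p.1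
        | some m => if key m < key p.1 then some p.1 else some m) (some b)).getD "standard"
      = (rest.foldl (fun bs p => if p.2 > bs.2 then (p.1, p.2) else bs) (b, s)).1 := by
  induction rest generalizing b s with
  | nil => simp
  | cons p t ih =>
    simp only [List.foldl_cons]
    have hp : key p.1 = p.2 := hrest p (List.mem_cons_self ..)
    have htail : ∀ q ∈ t, key q.1 = q.2 := fun q hq => hrest q (List.mem_cons_of_mem _ hq)
    by_cases h : s < p.2
    · have hk : key b < key p.1 := by rw [hb, hp]; exact h
      rw [if_pos hk, if_pos h]
      exact ih p.1 p.2 hp htail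
    · have hk : ¬ key b < key p.1 := by rw [hb, hp]; exact h
      rw [if_neg hk, if_neg h]
      exact ih b s hb htail

-- The bridge at the level of (class, score) pairs: A's dict-then-argmax = running argmax.
lemma pv_dict_eq_fold (ps : List (String × Int)) (hnd : (ps.map Prod.fst).Nodup) :
    (let scores := ps.foldl (fun d p => if p.2 > 0 then d.insert p.1 p.2 else d)
        (PySem.Dict.empty : PySem.Dict String Int)
     if scores.items = [] then "standard"
     else (PySem.List.max? scores.keys (fun k => scores.getD k 0)).getD "standard")
      = (ps.foldl (fun bs p => if p.2 > bs.2 then (p.1, p.2) else bs)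
          ("standard", (0 : Int))).1 := by
  have hitems := pv_fold_items ps PySem.Dict.empty (by simp) hnd
  simp only at hitems ⊢
  set scores := ps.foldl (fun d p => if p.2 > 0 then d.insert p.1 p.2 else d)
      (PySem.Dict.empty : PySem.Dict String Int) with hscores
  set L := ps.filter (fun p => p.2 > 0) with hL
  have hLsub : List.Sublist (L.map Prod.fst) (ps.map Prod.fst) := List.Sublist.map Prod.fst List.filter_sublist
  have hLnd : (L.map Prod.fst).Nodup := hnd.sublist hLsub
  have hitemsL : scores.items = L := by simpa using hitems
  have hkeys : scores.keys = L.map Prod.fst := by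
    simp only [PySem.Dict.keys, hitemsL]
  have hknd : scores.keys.Nodup := by rw [hkeys]; exact hLnd
  have hkey : ∀ p ∈ L, scores.getD p.1 0 = p.2 := by
    intro p hp
    exact PySem.Dict.getD_of_mem_items _ (by rw [hitemsL]; exact hp) hknd 0
  rw [pv_fold_filter ps "standard" 0 le_rfl, ← hL]
  match hLc : L with
  | [] => simp [hitemsL]
  | x :: rest =>
    have hxpos : x.2 > 0 := by
      have hx : x ∈ List.filter (fun p => decide (p.2 > 0)) ps := hL ▸ List.mem_cons_self ..
      simpa using (List.of_mem_filter hx)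
    rw [if_neg (by simp [hitemsL])]
    have hkx : scores.getD x.1 0 = x.2 := hkey x (List.mem_cons_self ..)
    have hkrest : ∀ p ∈ rest, scores.getD p.1 0 = p.2 :=
      fun p hp => hkey p (List.mem_cons_of_mem _ hp)
    rw [hkeys]
    simp only [PySem.List.max?, List.map_cons, List.foldl_cons, List.foldl_map]
    rw [if_pos hxpos]
    convert pv_fold_argmax (fun k => scores.getD k 0) rest x.1 x.2 hkx hkrest using 2
    congr 1
    funext acc p
    cases acc <;> rfl

-- B's recursion on rules computes pvFrBest of the scored pairs.
lemma pvBestB_eq_frBest (text : String) (rs : List (String × List String)) :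
    pvBestB text rs = pvFrBest (rs.map (fun r => (r.1, pvScore text r))) := by
  induction rs with
  | nil => rfl
  | cons r t ih => simp only [pvBestB, pvFrBest, List.map_cons, pvScore, ih]

-- ===== VERDICT (by name: the statement is the Claim_ definition above) =====
theorem detect_class_spec : Claim_equal_detect_class := by
  intro sentence _
  show detect_class sentence = detect_class_alt sentence
  set text := PySem.Str.lower sentence with htext
  set ps := PHONEME_RULES.map (fun r => (r.1, pvScore text r)) with hps
  have hnd : (ps.map Prod.fst).Nodup := by
    rw [hps, List.map_map]
    have : (Prod.fst ∘ fun r : String × List String => (r.1, pvScore text r))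
        = fun r : String × List String => r.1 := rfl
    rw [this]
    decide
  have hA : detect_class sentence
      = (ps.foldl (fun bs p => if p.2 > bs.2 then (p.1, p.2) else bs)
          ("standard", (0 : Int))).1 := by
    have h := pv_dict_eq_fold ps hnd
    simpa only [hps, List.foldl_map, pvScore, detect_class] using h
  have hB : detect_class_alt sentence = (pvFrBest ps).1 := by
    simp only [detect_class_alt, pvBestB_eq_frBest, hps, htext]
  rw [hA, hB, pv_foldl_eq_frBest ps ("standard", 0) le_rfl]
  by_cases h : (pvFrBest ps).2 > 0
  · rw [if_pos h]
  · rw [if_neg h, pvFrBest_zero ps (not_lt.mp h)]
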